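-- pv_equiv track=rewrite | github.com/crocuis/MatchAnalyzer | batch/src/jobs/backfill_assets_job.py | iter_team_logo_search_names
-- ===== SOURCE A (Python) =====
-- TEAM_LOGO_SEARCH_ALIASES = {
--     "Fiorentina": ("ACF Fiorentina",),
--     "Real Betis": ("Real Betis Balompie",),
--     "Rapid Wien": ("SK Rapid Wien",),
--     "Djurgarden": ("Djurgardens IF",),
--     "Jagiellonia": ("Jagiellonia Bialystok",),
--     "Panathinaikos": ("Panathinaikos FC",),
--     "Copenhagen": ("FC Copenhagen",),
--     "Celje": ("NK Celje",),
--     "Lugano": ("FC Lugano",),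
--     "Vitoria Guimaraes": ("Vitoria SC",),
--     "Legia Warsaw": ("Legia Warszawa",),
-- }
--
-- def iter_team_logo_search_names(team_name: str) -> tuple[str, ...]:
--     candidates: list[str] = []
--     seen: set[str] = set()
--
--     def add(candidate: str | None) -> None:
--         normalized = str(candidate or "").strip()
--         if not normalized or normalized in seen:
--             return
--         seen.add(normalized)
--         candidates.append(normalized)
--
--     add(team_name)
--     for alias in TEAM_LOGO_SEARCH_ALIASES.get(team_name, ()):
--         add(alias)
--     if team_name.endswith(" FC"):
--         add(team_name[:-3])
--     else:
--         add(f"{team_name} FC")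
--     if team_name.startswith("FC "):
--         add(team_name[3:])
--     return tuple(candidates)
-- ===== SOURCE B (Python) =====
-- TEAM_LOGO_SEARCH_ALIASES = {
--     "Fiorentina": ("ACF Fiorentina",),
--     "Real Betis": ("Real Betis Balompie",),
--     "Rapid Wien": ("SK Rapid Wien",),
--     "Djurgarden": ("Djurgardens IF",),
--     "Jagiellonia": ("Jagiellonia Bialystok",),
--     "Panathinaikos": ("Panathinaikos FC",),
--     "Copenhagen": ("FC Copenhagen",),
--     "Celje": ("NK Celje",),
--     "Lugano": ("FC Lugano",),
--     "Vitoria Guimaraes": ("Vitoria SC",),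
--     "Legia Warsaw": ("Legia Warszawa",),
-- }
--
--
-- def iter_team_logo_search_names(team_name: str) -> tuple[str, ...]:
--     raw = [
--         team_name,
--         *TEAM_LOGO_SEARCH_ALIASES.get(team_name, ()),
--         team_name[:-3] if team_name.endswith(" FC") else f"{team_name} FC",
--         *((team_name[3:],) if team_name.startswith("FC ") else ()),
--     ]
--
--     def clean(items: list) -> tuple:
--         # Recursive dedup: normalize the head, delete every later occurrence
--         # of it from the tail, recurse.  No seen-set is ever maintained.
--         if not items:
--             return ()
--         head = str(items[0] or "").strip()
--         rest = [x for x in items[1:] if str(x or "").strip() != head]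
--         tail = clean(rest)
--         return tail if not head else (head,) + tail
--
--     return clean(raw)
-- ===== Notes on version B (the rewrite author's own statement) =====
-- stated objective: alternative
-- what changed: Replaced A's single-pass seen-set accumulator with a two-phase structure: build the flat raw candidate list, then dedupe it by a recursive algorithm that normalizes the head and deletes every later occurrence of it from the tail before recursing - no set or dict is maintained at all.
import Mathlib
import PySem

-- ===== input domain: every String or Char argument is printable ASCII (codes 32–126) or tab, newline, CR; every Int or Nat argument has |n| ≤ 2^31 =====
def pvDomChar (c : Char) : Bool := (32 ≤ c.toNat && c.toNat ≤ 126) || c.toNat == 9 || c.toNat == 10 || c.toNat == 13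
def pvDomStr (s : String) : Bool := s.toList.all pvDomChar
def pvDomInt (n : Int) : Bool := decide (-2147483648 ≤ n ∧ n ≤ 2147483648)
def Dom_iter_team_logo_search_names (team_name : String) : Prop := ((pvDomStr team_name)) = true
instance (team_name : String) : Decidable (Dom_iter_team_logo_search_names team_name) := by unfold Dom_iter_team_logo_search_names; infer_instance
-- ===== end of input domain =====

-- B replaces A's incremental seen-set accumulator with a two-phase structure: build the flat raw
-- candidate list, then dedupe it recursively by deleting each head's later occurrences from the
-- tail (no set/dict maintained); alternative decomposition, same observable result.

-- shared module-level constant TEAM_LOGO_SEARCH_ALIASES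
def teamLogoAliases : PySem.Dict String (List String) := PySem.Dict.ofList
  [ ("Fiorentina", ["ACF Fiorentina"])
  , ("Real Betis", ["Real Betis Balompie"])
  , ("Rapid Wien", ["SK Rapid Wien"])
  , ("Djurgarden", ["Djurgardens IF"])
  , ("Jagiellonia", ["Jagiellonia Bialystok"])
  , ("Panathinaikos", ["Panathinaikos FC"])
  , ("Copenhagen", ["FC Copenhagen"])
  , ("Celje", ["NK Celje"])
  , ("Lugano", ["FC Lugano"])
  , ("Vitoria Guimaraes", ["Vitoria SC"])
  , ("Legia Warsaw", ["Legia Warszawa"]) ]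

-- ===== PORT A =====
-- the nested 'add' closure: state = (candidates, seen)
def pvAddA (st : List String × PySem.Set String) (candidate : String) :
    List String × PySem.Set String :=
  let normalized := PySem.Str.strip (if candidate = "" then "" else candidate)
  if normalized = "" ∨ normalized ∈ st.2 then st
  else (st.1 ++ [normalized], PySem.Set.add st.2 normalized)

def iter_team_logo_search_names (team_name : String) : List String :=
  let st0 : List String × PySem.Set String := ([], PySem.Set.empty)
  let st1 := pvAddA st0 team_name
  let st2 := (PySem.Dict.getD teamLogoAliases team_name []).foldl pvAddA st1
  let st3 :=
    if PySem.Str.endswith team_name " FC" then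
      pvAddA st2 (PySem.Str.slice team_name none (some (-3)))
    else
      pvAddA st2 (team_name ++ " FC")
  let st4 :=
    if PySem.Str.startswith team_name "FC " then
      pvAddA st3 (PySem.Str.slice team_name (some 3) none)
    else st3
  st4.1

-- ===== PORT B =====
-- the nested 'clean' helper of Source B: recursive dedup that normalizes the head and deletes
-- every later occurrence of it from the tail before recursing (no seen-set)
def pvClean : List String → List String
  | [] => []
  | c :: rest =>
    let head := PySem.Str.strip (if c = "" then "" else c)
    let rest' := rest.filter (fun x => !decide (PySem.Str.strip (if x = "" then "" else x) = head))
    let tail := pvClean rest'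
    if head = "" then tail else head :: tail
termination_by l => l.length
decreasing_by
  simp only [List.length_cons, List.length_unattach]
  exact Nat.lt_succ_of_le (le_trans (List.length_filter_le _ _) (by simp))

def iter_team_logo_search_names_alt (team_name : String) : List String :=
  let raw : List String :=
    [team_name]
    ++ PySem.Dict.getD teamLogoAliases team_name []
    ++ [if PySem.Str.endswith team_name " FC" then PySem.Str.slice team_name none (some (-3))
        else team_name ++ " FC"]
    ++ (if PySem.Str.startswith team_name "FC " then [PySem.Str.slice team_name (some 3) none]
        else [])
  pvClean raw

-- ===== PRECONDITION & SPEC =====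
def Spec_iter_team_logo_search_names (team_name : String) (out : List String) : Prop := out = iter_team_logo_search_names_alt team_name
instance (team_name : String) (out : List String) : Decidable (Spec_iter_team_logo_search_names team_name out) := by unfold Spec_iter_team_logo_search_names; infer_instance

-- ===== CLAIM (what is proved, stated in full; the proofs are below) =====
def Claim_equal_iter_team_logo_search_names : Prop := ∀ (team_name : String), Dom_iter_team_logo_search_names team_name → Spec_iter_team_logo_search_names team_name (iter_team_logo_search_names team_name)

-- ===== LEMMAS AND PROOFS =====

-- the shared normalization str(c or "").strip()
def pvNorm (c : String) : String := PySem.Str.strip (if c = "" then "" else c)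

-- proof-side: what A's add-loop appends to candidates `cs` when fed the list `l`
def pvDD (cs : List String) : List String → List String
  | [] => []
  | c :: l =>
    let n := pvNorm c
    if n = "" ∨ n ∈ cs then pvDD cs l else n :: pvDD (cs ++ [n]) l

theorem pvAddA_pair (cs : List String) (c : String) :
    pvAddA (cs, cs) c =
      (let n := pvNorm c
       if n = "" ∨ n ∈ cs then (cs, cs) else (cs ++ [n], cs ++ [n])) := by
  simp only [pvAddA, pvNorm]
  by_cases h : PySem.Str.strip (if c = "" then "" else c) = "" ∨
      PySem.Str.strip (if c = "" then "" else c) ∈ cs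
  · simp only [if_pos h]
  · have hm : PySem.Str.strip (if c = "" then "" else c) ∉ cs := fun hc => h (Or.inr hc)
    simp only [if_neg h]
    simp [PySem.Set.add, PySem.Set.contains, hm]

theorem foldl_pvAddA (l cs : List String) :
    l.foldl pvAddA (cs, cs) = (cs ++ pvDD cs l, cs ++ pvDD cs l) := by
  induction l generalizing cs with
  | nil => simp [pvDD]
  | cons c l ih =>
    simp only [List.foldl_cons, pvAddA_pair, pvDD]
    by_cases h : pvNorm c = "" ∨ pvNorm c ∈ cs
    · simp only [if_pos h]
      exact ih cs
    · simp only [if_neg h]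
      rw [ih (cs ++ [pvNorm c])]
      simp [List.append_assoc]

theorem pvDD_spec (l cs : List String) :
    pvDD cs l =
      (PySem.List.dedup ((l.map pvNorm).filter (fun n => !(n = "")))).filter
        (fun n => !(n ∈ cs)) := by
  induction l generalizing cs with
  | nil => simp [pvDD]
  | cons c l ih =>
    simp only [pvDD, List.map_cons, List.filter_cons]
    set n := pvNorm c with hn
    by_cases hne : n = ""
    · simp [hne, ih cs]
    · have hk : (!decide (n = "")) = true := by simp [hne]
      rw [hk]
      simp only [if_true]
      rw [PySem.List.dedup_eq_ofList, PySem.Set.ofList_cons, ← PySem.List.dedup_eq_ofList]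
      have hdis : PySem.Set.discard
          (PySem.List.dedup ((l.map pvNorm).filter (fun n => !(n = "")))) n
          = (PySem.List.dedup ((l.map pvNorm).filter (fun n => !(n = "")))).filter
              (fun y => !(y = n)) := by
        simp only [PySem.Set.discard]
        apply List.filter_congr
        intro x _
        by_cases hx : x = n <;> simp [hx]
      by_cases hmem : n ∈ cs
      · have : (n = "" ∨ n ∈ cs) := Or.inr hmem
        rw [if_pos this, ih cs, hdis]
        simp only [List.filter_cons]
        have : (!decide (n ∈ cs)) = false := by simp [hmem]
        rw [this]
        simp only [List.filter_filter]
        apply List.filter_congr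
        intro x _
        by_cases hx : x ∈ cs
        · simp [hx]
        · have : x ≠ n := fun e => hx (e ▸ hmem)
          simp [hx, this]
      · have : ¬ (n = "" ∨ n ∈ cs) := not_or.mpr ⟨hne, hmem⟩
        rw [if_neg this, ih (cs ++ [n]), hdis]
        simp only [List.filter_cons]
        have : (!decide (n ∈ cs)) = true := by simp [hmem]
        rw [this]
        simp only [if_true, List.filter_filter]
        congr 1
        apply List.filter_congr
        intro x _
        by_cases hx : x = n
        · simp [hx]
        · simp [hx, List.mem_append]

theorem A_eq_foldl (team_name : String) :
    iter_team_logo_search_names team_name =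
      (([team_name]
        ++ PySem.Dict.getD teamLogoAliases team_name []
        ++ [if PySem.Str.endswith team_name " FC" then PySem.Str.slice team_name none (some (-3))
            else team_name ++ " FC"]
        ++ (if PySem.Str.startswith team_name "FC " then [PySem.Str.slice team_name (some 3) none]
            else [])).foldl pvAddA ([], PySem.Set.empty)).1 := by
  by_cases h1 : PySem.Str.endswith team_name " FC" = true <;>
    by_cases h2 : PySem.Str.startswith team_name "FC " = true <;>
    simp only [iter_team_logo_search_names, List.foldl_append, List.foldl_cons, List.foldl_nil,
      h1, h2, if_true, Bool.false_eq_true, if_false]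

-- filtering commutes with the normalization map
theorem map_filter_pvNorm (l : List String) (h : String) :
    (l.filter (fun x => !decide (pvNorm x = h))).map pvNorm
      = (l.map pvNorm).filter (fun y => !decide (y = h)) := by
  induction l with
  | nil => rfl
  | cons c l ih =>
    by_cases hc : pvNorm c = h <;> simp [hc, ih]

-- PySem.Set.discard is a filter
theorem discard_eq_filter (S : PySem.Set String) (n : String) :
    PySem.Set.discard S n = List.filter (fun y => !(y = n)) S := by
  simp only [PySem.Set.discard]
  apply List.filter_congr
  intro x _
  by_cases hx : x = n <;> simp [hx]

-- dedup commutes with filter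
theorem dedup_filter (p : String → Bool) (l : List String) :
    PySem.List.dedup (l.filter p) = (PySem.List.dedup l).filter p := by
  induction l with
  | nil => rfl
  | cons c l ih =>
    by_cases hc : p c = true
    · rw [List.filter_cons_of_pos hc,
        PySem.List.dedup_eq_ofList (c :: List.filter p l), PySem.Set.ofList_cons,
        ← PySem.List.dedup_eq_ofList,
        PySem.List.dedup_eq_ofList (c :: l), PySem.Set.ofList_cons, ← PySem.List.dedup_eq_ofList,
        List.filter_cons_of_pos hc,
        discard_eq_filter, discard_eq_filter, ih, List.filter_filter, List.filter_filter]
      congr 1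
      apply List.filter_congr
      intro x _
      exact Bool.and_comm _ _
    · have hc' : p c = false := by simpa using hc
      rw [List.filter_cons_of_neg (by simp [hc']),
        PySem.List.dedup_eq_ofList (c :: l), PySem.Set.ofList_cons, ← PySem.List.dedup_eq_ofList,
        List.filter_cons_of_neg (by simp [hc']), discard_eq_filter, ih, List.filter_filter]
      apply List.filter_congr
      intro x _
      by_cases hx : x = c
      · subst hx; simp [hc']
      · simp [hx]

theorem pvClean_spec_aux (fuel : Nat) :
    ∀ l : List String, l.length ≤ fuel →
      pvClean l = PySem.List.dedup ((l.map pvNorm).filter (fun n => !(n = ""))) := by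
  induction fuel with
  | zero =>
    intro l hl
    have : l = [] := List.eq_nil_of_length_eq_zero (Nat.le_zero.mp hl)
    subst this; simp [pvClean]
  | succ k ih =>
    intro l hl
    match l with
    | [] => simp [pvClean]
    | c :: rest =>
      simp only [pvClean]
      set head := PySem.Str.strip (if c = "" then "" else c) with hhead
      set rest' := rest.filter
        (fun x => !decide (PySem.Str.strip (if x = "" then "" else x) = head)) with hrest'
      have hlen : rest'.length ≤ k := by
        have h1 : rest'.length ≤ rest.length := List.length_filter_le _ _
        have h2 : rest.length ≤ k := by simpa using Nat.le_of_succ_le_succ hl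
        omega
      have ihr := ih rest' hlen
      have hmap : rest'.map pvNorm = (rest.map pvNorm).filter (fun y => !decide (y = head)) := by
        rw [hrest']
        have := map_filter_pvNorm rest head
        simpa [pvNorm] using this
      by_cases hh : head = ""
      · rw [if_pos hh, ihr, hmap, List.filter_filter]
        have hstep : ((c :: rest).map pvNorm).filter (fun n => !(n = ""))
            = (rest.map pvNorm).filter (fun n => !(n = "")) := by
          simp [pvNorm, ← hhead, hh]
        rw [hstep]
        congr 1
        apply List.filter_congr
        intro x _
        rw [hh]
        by_cases hx : x = "" <;> simp [hx]
      · rw [if_neg hh, ihr, hmap, List.filter_filter]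
        have hstep : ((c :: rest).map pvNorm).filter (fun n => !(n = ""))
            = head :: ((rest.map pvNorm).filter (fun n => !(n = ""))) := by
          simp [pvNorm, ← hhead, hh]
        rw [hstep, PySem.List.dedup_eq_ofList (head :: _), PySem.Set.ofList_cons,
          ← PySem.List.dedup_eq_ofList, discard_eq_filter, ← dedup_filter]
        congr 2
        rw [List.filter_filter]
        apply List.filter_congr
        intro x _
        by_cases hx : x = head <;> simp [hx, hh]

theorem pvClean_spec (l : List String) :
    pvClean l = PySem.List.dedup ((l.map pvNorm).filter (fun n => !(n = ""))) :=
  pvClean_spec_aux l.length l (Nat.le_refl _)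

-- ===== VERDICT (by name: the statement is the Claim_ definition above) =====
set_option maxHeartbeats 1000000 in
theorem iter_team_logo_search_names_spec : Claim_equal_iter_team_logo_search_names := by
  intro team_name _
  unfold Spec_iter_team_logo_search_names iter_team_logo_search_names_alt
  rw [A_eq_foldl]
  have he : (PySem.Set.empty : PySem.Set String) = ([] : List String) := rfl
  rw [he, foldl_pvAddA, pvDD_spec, pvClean_spec]
  simp only [List.not_mem_nil, decide_false, Bool.not_false, List.filter_true, List.nil_append]
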